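-- pv_equiv track=rewrite | github.com/hy54321/DM_Helper_MCP | server/sql_guard.py | _has_unquoted_semicolon
-- ===== SOURCE A (Python) =====
-- def _has_unquoted_semicolon(sql: str) -> bool:
--     """Detect semicolons outside of single- and double-quoted strings."""
--     in_single = False
--     in_double = False
--     i = 0
--     while i < len(sql):
--         ch = sql[i]
--         if ch == "'" and not in_double:
--             # Handle escaped quotes ('')
--             if in_single and i + 1 < len(sql) and sql[i + 1] == "'":
--                 i += 2
--                 continue
--             in_single = not in_single
--         elif ch == '"' and not in_single:
--             if in_double and i + 1 < len(sql) and sql[i + 1] == '"':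
--                 i += 2
--                 continue
--             in_double = not in_double
--         elif ch == ";" and not in_single and not in_double:
--             return True
--         i += 1
--     return False
-- ===== SOURCE B (Python) =====
-- def _has_unquoted_semicolon(sql: str) -> bool:
--     """Detect semicolons outside of single- and double-quoted strings.
--
--     Instead of maintaining in_single/in_double flags char by char, jump over
--     each quoted literal with str.find (doubled quotes '' / "" are escapes;
--     an unterminated literal swallows the rest of the string)."""
--     n = len(sql)
--     i = 0
--     while i < n:
--         c = sql[i]
--         if c == "'" or c == '"':
--             j = i + 1
--             while True:
--                 k = sql.find(c, j)
--                 if k == -1: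
--                     return False  # unterminated literal runs to the end
--                 if sql[k + 1 : k + 2] == c:
--                     j = k + 2  # doubled quote: escaped, keep scanning
--                 else:
--                     i = k + 1  # closing quote found
--                     break
--         elif c == ";":
--             return True
--         else:
--             i += 1
--     return False
-- ===== Notes on version B (the rewrite author's own statement) =====
-- stated objective: alternative
-- what changed: Replaces the char-by-char state machine with in_single/in_double flags by a scanner with no flags that jumps over each quoted literal with str.find (skipping doubled-quote escapes) and returns False when a literal is unterminated.
import Mathlib
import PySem

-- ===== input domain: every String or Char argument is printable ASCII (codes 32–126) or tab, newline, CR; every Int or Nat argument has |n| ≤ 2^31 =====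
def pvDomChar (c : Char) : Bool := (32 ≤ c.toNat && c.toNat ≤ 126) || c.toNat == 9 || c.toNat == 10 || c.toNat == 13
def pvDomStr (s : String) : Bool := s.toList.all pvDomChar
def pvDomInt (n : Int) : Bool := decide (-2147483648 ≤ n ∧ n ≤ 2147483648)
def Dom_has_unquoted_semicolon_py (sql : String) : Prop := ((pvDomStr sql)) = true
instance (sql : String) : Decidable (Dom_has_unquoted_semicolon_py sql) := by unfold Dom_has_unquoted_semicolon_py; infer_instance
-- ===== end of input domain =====

-- B replaces A's char-by-char flag state machine by jumping over each quoted literal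
-- with a find-the-closing-quote scan (objective: alternative; same return value).

-- ===== PORT A =====
-- A's while-loop over index i with flags (in_single, in_double), ported as the obvious
-- structural recursion over the remaining characters with the same two flags
-- (the lookahead test `i + 1 < len(sql) and sql[i+1] == q` is `rest.head? == some q`,
-- and `i += 2; continue` drops to rest.tail).
def loopA (ins ind : Bool) : List Char → Bool
  | [] => false
  | c :: rest =>
    if c = '\'' && !ind then
      -- escaped quote '' inside a single-quoted literal
      if ins && rest.head? == some '\'' then loopA ins ind rest.tail
      else loopA (!ins) ind rest
    else if c = '"' && !ins then
      if ind && rest.head? == some '"' then loopA ins ind rest.tail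
      else loopA ins (!ind) rest
    else if c = ';' && !ins && !ind then true
    else loopA ins ind rest
termination_by l => l.length
decreasing_by all_goals (simp [List.length_tail]; try omega)

def has_unquoted_semicolon_py (sql : String) : Bool := loopA false false sql.toList

-- ===== PORT B =====
-- Port of Source B's inner `while True: k = sql.find(c, j) …` loop: str.find's scan to the
-- next occurrence of q is transcribed as structural recursion over the remaining chars;
-- `none` is the `return False` of the k == -1 branch, `some rest'` are the characters
-- after the closing quote (i = k + 1); `sql[k+1:k+2] == c` is `rest.head? == some q`.
def eatB (q : Char) : List Char → Option (List Char)
  | [] => none                                        -- find returned -1: unterminated literal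
  | c :: rest =>
    if c = q then
      if rest.head? == some q then eatB q rest.tail   -- doubled quote: escaped, j = k + 2
      else some rest                                  -- closing quote, i = k + 1
    else eatB q rest                                  -- find skips characters ≠ q
termination_by l => l.length
decreasing_by all_goals (simp [List.length_tail]; try omega)

theorem eatB_length_le (q : Char) : ∀ (n : Nat) (l r : List Char), l.length ≤ n →
    eatB q l = some r → r.length ≤ l.length := by
  intro n
  induction n with
  | zero => intro l r hl h; match l with
            | [] => simp [eatB] at h
  | succ n ih =>
    intro l r hl h
    match l with
    | [] => simp [eatB] at h
    | c :: rest =>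
      by_cases hc : c = q
      · by_cases hh : rest.head? == some q
        · simp [eatB, hc, hh] at h
          have := ih rest.tail r (by simp at hl ⊢; omega) h
          simp [List.length_tail] at this ⊢; omega
        · simp [eatB, hc, hh] at h
          simp [← h]
      · simp [eatB, hc] at h
        have := ih rest r (by simp at hl; omega) h
        simp; omega

-- Source B's outer while-loop over i, as structural recursion over the remaining chars.
def loopB : List Char → Bool
  | [] => false
  | c :: rest =>
    if c = '\'' || c = '"' then
      match h : eatB c rest with
      | none => false
      | some rest' => loopB rest'
    else if c = ';' then true
    else loopB rest
termination_by l => l.length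
decreasing_by
  · have := eatB_length_le c rest.length rest rest' le_rfl h
    simp; omega
  · simp

def has_unquoted_semicolon_py_alt (sql : String) : Bool := loopB sql.toList

-- ===== PRECONDITION & SPEC =====
def Spec_has_unquoted_semicolon_py (sql : String) (out : Bool) : Prop := out = has_unquoted_semicolon_py_alt sql
instance (sql : String) (out : Bool) : Decidable (Spec_has_unquoted_semicolon_py sql out) := by unfold Spec_has_unquoted_semicolon_py; infer_instance

-- ===== CLAIM (what is proved, stated in full; the proofs are below) =====
def Claim_equal_has_unquoted_semicolon_py : Prop := ∀ (sql : String), Dom_has_unquoted_semicolon_py sql → Spec_has_unquoted_semicolon_py sql (has_unquoted_semicolon_py sql)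

-- ===== LEMMAS AND PROOFS =====

-- Main invariant: outside quotes A's loop equals B's loop; inside a q-quoted literal
-- A's continued scan equals B's eatB-skip followed by B's loop.
theorem loopA_eq_loopB : ∀ (n : Nat) (l : List Char), l.length ≤ n →
    (loopA false false l = loopB l) ∧
    (loopA true false l = (eatB '\'' l).elim false loopB) ∧
    (loopA false true l = (eatB '"' l).elim false loopB) := by
  intro n
  induction n with
  | zero =>
    intro l hl
    match l with
    | [] => simp [loopA, eatB, loopB]
  | succ n ih =>
    intro l hl
    match l with
    | [] => simp [loopA, eatB, loopB]
    | c :: rest =>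
      have hr : rest.length ≤ n := by simp at hl; omega
      have ihrest := ih rest hr
      refine ⟨?_, ?_, ?_⟩
      · -- outside quotes
        by_cases h1 : c = '\''
        · subst h1
          simp [loopA, loopB, ihrest.2.1]
          cases eatB '\'' rest <;> simp
        · by_cases h2 : c = '"'
          · subst h2
            simp [loopA, loopB, h1, ihrest.2.2]
            cases eatB '"' rest <;> simp
          · by_cases h3 : c = ';'
            · subst h3; simp [loopA, loopB]
            · simp [loopA, loopB, h1, h2, h3, ihrest.1]
      · -- inside a single-quoted literal
        by_cases h1 : c = '\''
        · subst h1
          by_cases hh : rest.head? == some '\''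
          · have ht := ih rest.tail (by simp [List.length_tail]; omega)
            simp [loopA, eatB, hh, ht.2.1]
          · simp [loopA, eatB, hh, ihrest.1]
        · by_cases h2 : c = '"'
          · subst h2; simp [loopA, eatB, h1, ihrest.2.1]
          · by_cases h3 : c = ';'
            · subst h3; simp [loopA, eatB, h1, h2, ihrest.2.1]
            · simp [loopA, eatB, h1, h2, h3, ihrest.2.1]
      · -- inside a double-quoted literal
        by_cases h1 : c = '"'
        · subst h1
          by_cases hh : rest.head? == some '"'
          · have ht := ih rest.tail (by simp [List.length_tail]; omega)
            simp [loopA, eatB, hh, ht.2.2]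
          · simp [loopA, eatB, hh, ihrest.1]
        · by_cases h2 : c = '\''
          · subst h2; simp [loopA, eatB, h1, ihrest.2.2]
          · by_cases h3 : c = ';'
            · subst h3; simp [loopA, eatB, h1, h2, ihrest.2.2]
            · simp [loopA, eatB, h1, h2, h3, ihrest.2.2]

-- ===== VERDICT (by name: the statement is the Claim_ definition above) =====
theorem has_unquoted_semicolon_py_spec : Claim_equal_has_unquoted_semicolon_py := by
  intro sql _
  unfold Spec_has_unquoted_semicolon_py has_unquoted_semicolon_py has_unquoted_semicolon_py_alt
  exact (loopA_eq_loopB sql.toList.length sql.toList le_rfl).1
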